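-- pv_equiv track=rewrite | github.com/yzlu0917/apg | CAVE/scripts/judge_contrastive_locality_candidates.py | compute_minimal_makespan
-- ===== SOURCE A (Python) =====
-- def compute_minimal_makespan(tasks: set[str], edges: list[tuple[str, str]], durations: dict[str, int]) -> int | None:
--     if not tasks or any(task not in durations for task in tasks):
--         return None
--     incoming: dict[str, list[str]] = {task: [] for task in tasks}
--     outgoing: dict[str, list[str]] = {task: [] for task in tasks}
--     indegree = {task: 0 for task in tasks}
--     for left, right in edges:
--         if left in tasks and right in tasks:
--             incoming[right].append(left)
--             outgoing[left].append(right)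
--             indegree[right] += 1
--     queue = sorted(task for task in tasks if indegree[task] == 0)
--     topo: list[str] = []
--     while queue:
--         task = queue.pop(0)
--         topo.append(task)
--         for neighbor in sorted(outgoing[task]):
--             indegree[neighbor] -= 1
--             if indegree[neighbor] == 0:
--                 queue.append(neighbor)
--                 queue.sort()
--     if len(topo) != len(tasks):
--         return None
--
--     earliest_start = {task: 0 for task in tasks}
--     for task in topo:
--         if incoming[task]:
--             earliest_start[task] = max(earliest_start[parent] + durations[parent] for parent in incoming[task])
--     return max(earliest_start[task] + durations[task] for task in tasks)
-- ===== SOURCE B (Python) =====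
-- def compute_minimal_makespan(tasks: set[str], edges: list[tuple[str, str]], durations: dict[str, int]) -> int | None:
--     if not tasks or any(task not in durations for task in tasks):
--         return None
--     parents: dict[str, list[str]] = {task: [] for task in tasks}
--     for left, right in edges:
--         if left in tasks and right in tasks:
--             parents[right].append(left)
--     finish: dict[str, int] = {}
--     remaining = sorted(tasks)
--     while remaining:
--         ready = [task for task in remaining if all(p in finish for p in parents[task])]
--         if not ready:
--             return None
--         task = ready[0]
--         remaining.remove(task)
--         finish[task] = durations[task] + max((finish[p] for p in parents[task]), default=0)
--     return max(finish.values())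
-- ===== Notes on version B (the rewrite author's own statement) =====
-- stated objective: simpler
-- what changed: Replaces Kahn's algorithm (indegree bookkeeping plus a re-sorted queue, then a second earliest-start DP pass over the topo order) by a single fused loop that repeatedly scans the sorted remaining tasks for the first task whose parents are all finished and records its finish time directly, returning the maximum finish time.
import Mathlib
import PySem

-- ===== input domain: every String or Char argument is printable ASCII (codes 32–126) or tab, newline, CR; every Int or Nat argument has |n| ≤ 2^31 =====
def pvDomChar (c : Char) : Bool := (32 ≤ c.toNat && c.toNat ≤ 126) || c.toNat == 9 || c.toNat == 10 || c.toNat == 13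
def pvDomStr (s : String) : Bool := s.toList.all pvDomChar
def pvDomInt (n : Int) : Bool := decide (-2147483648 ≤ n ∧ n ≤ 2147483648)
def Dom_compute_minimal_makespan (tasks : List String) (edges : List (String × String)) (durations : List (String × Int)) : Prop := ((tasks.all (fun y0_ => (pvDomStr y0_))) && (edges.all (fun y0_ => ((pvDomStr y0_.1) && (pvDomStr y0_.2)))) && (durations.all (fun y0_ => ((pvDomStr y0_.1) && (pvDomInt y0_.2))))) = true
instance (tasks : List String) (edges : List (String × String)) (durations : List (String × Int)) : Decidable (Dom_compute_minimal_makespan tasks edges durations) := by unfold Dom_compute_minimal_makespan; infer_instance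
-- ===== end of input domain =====

-- B replaces Kahn's algorithm (indegree + re-sorted queue, then a second DP pass) by one fused
-- loop that scans the sorted remaining tasks for the first task whose parents are all finished
-- and records its finish time directly (objective: simpler; not faster).

-- ===== PORT A =====
-- max() of a nonempty list of ints (every caller guards nonemptiness)
def pyMaxInt : List Int → Int
  | [] => 0
  | x :: xs => xs.foldl max x

-- the 'while queue:' loop of A; fuel = len(tasks) is enough on duplicate-free tasks (each
-- iteration appends one new task to topo), see the lemmas below; the fuel guard only makes
-- the recursion structural.
def cmmKahnLoop (outgoing : PySem.Dict String (List String)) :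
    Nat → List String → List String → PySem.Dict String Int → List String
  | 0, _queue, topo, _indeg => topo
  | fuel+1, queue, topo, indeg =>
    match queue with
    | [] => topo
    | task :: rest =>
      let st := (PySem.List.sorted (outgoing.getD task []) (fun x => x)).foldl
          (fun (st : List String × PySem.Dict String Int) nb =>
            let ind := st.2.insert nb (st.2.getD nb 0 - 1)
            if ind.getD nb 0 == 0 then (PySem.List.sorted (st.1 ++ [nb]) (fun x => x), ind)
            else (st.1, ind))
          (rest, indeg)
      cmmKahnLoop outgoing fuel st.1 (topo ++ [task]) st.2

def compute_minimal_makespan (tasks : List String) (edges : List (String × String)) (durations : List (String × Int)) : Option Int :=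
  let dd := PySem.Dict.mk durations
  if tasks.isEmpty || tasks.any (fun t => !(dd.contains t)) then none
  else
    let st := edges.foldl
        (fun (st : PySem.Dict String (List String) × PySem.Dict String (List String) × PySem.Dict String Int) e =>
          if tasks.contains e.1 && tasks.contains e.2 then
            (st.1.insert e.2 (st.1.getD e.2 [] ++ [e.1]),
             st.2.1.insert e.1 (st.2.1.getD e.1 [] ++ [e.2]),
             st.2.2.insert e.2 (st.2.2.getD e.2 0 + 1))
          else st)
        (tasks.foldl (fun d t => d.insert t ([] : List String)) PySem.Dict.empty,
         tasks.foldl (fun d t => d.insert t ([] : List String)) PySem.Dict.empty,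
         tasks.foldl (fun d t => d.insert t (0 : Int)) PySem.Dict.empty)
    let incoming := st.1
    let outgoing := st.2.1
    let indeg := st.2.2
    let queue := PySem.List.sorted (tasks.filter (fun t => indeg.getD t 0 == 0)) (fun x => x)
    let topo := cmmKahnLoop outgoing tasks.length queue [] indeg
    if topo.length ≠ tasks.length then none
    else
      -- earliest_start pass; getD is exact: every key read is present (initialised for all tasks)
      let est := topo.foldl
          (fun d t =>
            if (incoming.getD t []).isEmpty then d
            else d.insert t (pyMaxInt ((incoming.getD t []).map (fun p => d.getD p 0 + dd.getD p 0))))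
          (tasks.foldl (fun d t => d.insert t (0 : Int)) PySem.Dict.empty)
      some (pyMaxInt (tasks.map (fun t => est.getD t 0 + dd.getD t 0)))

-- ===== PORT B =====
-- the 'while remaining:' loop of B: pick the first ready task of the sorted remaining list,
-- record its finish time, drop it from remaining (list.remove of a member = List.erase).
def cmmSelectLoop (parents : PySem.Dict String (List String)) (dd : PySem.Dict String Int) :
    List String → PySem.Dict String Int → Option (PySem.Dict String Int)
  | [], finish => some finish
  | r :: rs, finish =>
    match hr : (r :: rs).filter (fun t => (parents.getD t []).all (fun p => finish.contains p)) with
    | [] => none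
    | task :: _ =>
      cmmSelectLoop parents dd ((r :: rs).erase task)
        (finish.insert task (dd.getD task 0 +
          PySem.List.maxD ((parents.getD task []).map (fun p => finish.getD p 0)) (fun x => x) 0))
  termination_by remaining _ => remaining.length
  decreasing_by
    have htask : task ∈ r :: rs := by
      exact (List.mem_filter.mp (hr ▸ List.mem_cons_self ..)).1
    have h1 := List.length_erase_of_mem htask
    simp only [List.length_cons] at h1 ⊢
    omega

def compute_minimal_makespan_alt (tasks : List String) (edges : List (String × String)) (durations : List (String × Int)) : Option Int :=
  let dd := PySem.Dict.mk durations
  if tasks.isEmpty || tasks.any (fun t => !(dd.contains t)) then none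
  else
    let parents := edges.foldl
        (fun d e => if tasks.contains e.1 && tasks.contains e.2 then d.insert e.2 (d.getD e.2 [] ++ [e.1]) else d)
        (tasks.foldl (fun d t => d.insert t ([] : List String)) PySem.Dict.empty)
    match cmmSelectLoop parents dd (PySem.List.sorted tasks (fun x => x)) PySem.Dict.empty with
    | none => none
    | some finish => some (pyMaxInt finish.values)

-- ===== PRECONDITION & SPEC =====
-- tasks is a Python set; Pre_ restricts its list encoding to duplicate-free lists, exactly as
-- the type convention (set[T] = list of the DISTINCT elements) prescribes.
def Pre_compute_minimal_makespan (tasks : List String) (edges : List (String × String)) (durations : List (String × Int)) : Prop := tasks.Nodup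
instance (tasks : List String) (edges : List (String × String)) (durations : List (String × Int)) : Decidable (Pre_compute_minimal_makespan tasks edges durations) := by unfold Pre_compute_minimal_makespan; infer_instance

def pvWitness_compute_minimal_makespan : List String × (List (String × String)) × (List (String × Int)) :=
  (["a", "b", "c"], [("a", "b"), ("b", "c")], [("a", 2), ("b", 3), ("c", 4)])

def Spec_compute_minimal_makespan (tasks : List String) (edges : List (String × String)) (durations : List (String × Int)) (out : Option Int) : Prop := out = compute_minimal_makespan_alt tasks edges durations
instance (tasks : List String) (edges : List (String × String)) (durations : List (String × Int)) (out : Option Int) : Decidable (Spec_compute_minimal_makespan tasks edges durations out) := by unfold Spec_compute_minimal_makespan; infer_instance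

-- ===== CLAIM (what is proved, stated in full; the proofs are below) =====
def Claim_equal_compute_minimal_makespan : Prop := ∀ (tasks : List String) (edges : List (String × String)) (durations : List (String × Int)), Dom_compute_minimal_makespan tasks edges durations → Pre_compute_minimal_makespan tasks edges durations → Spec_compute_minimal_makespan tasks edges durations (compute_minimal_makespan tasks edges durations)

-- ===== LEMMAS AND PROOFS =====

-- the edges with both endpoints in tasks, and the parent/child multiplicity lists they induce
def cmmEdgesF (tasks : List String) (edges : List (String × String)) : List (String × String) :=
  edges.filter (fun e => tasks.contains e.1 && tasks.contains e.2)

def cmmPl (tasks : List String) (edges : List (String × String)) (t : String) : List String :=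
  (((cmmEdgesF tasks edges).filter (fun e => e.2 == t)).map (fun e => e.1))

def cmmOl (tasks : List String) (edges : List (String × String)) (t : String) : List String :=
  (((cmmEdgesF tasks edges).filter (fun e => e.1 == t)).map (fun e => e.2))

-- "every element's parents lie in pre or strictly before it"
def cmmPrec (pl : String → List String) : List String → List String → Prop
  | _, [] => True
  | pre, t :: rest => (∀ p ∈ pl t, p ∈ pre) ∧ cmmPrec pl (pre ++ [t]) rest

lemma cmmPrec_snoc (pl : String → List String) (pre topo : List String) (task : String)
    (h : cmmPrec pl pre topo) (hp : ∀ p ∈ pl task, p ∈ pre ++ topo) :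
    cmmPrec pl pre (topo ++ [task]) := by
  induction topo generalizing pre with
  | nil => exact ⟨by simpa using hp, trivial⟩
  | cons a rest ih =>
    refine ⟨h.1, ih (pre ++ [a]) h.2 ?_⟩
    intro p hpp
    have := hp p hpp
    simp only [List.mem_append, List.mem_cons, List.mem_singleton] at this ⊢
    tauto

-- getD after the zero/empty-list initialisation fold
lemma cmm_getD_initFold {ν : Type} (tasks : List String) (v0 c : ν) (d : PySem.Dict String ν) (t : String) :
    ((tasks.foldl (fun d t => d.insert t v0) d).getD t c) = if t ∈ tasks then v0 else d.getD t c := by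
  induction tasks generalizing d with
  | nil => simp
  | cons a rest ih =>
    simp only [List.foldl_cons, ih, List.mem_cons]
    by_cases h1 : t ∈ rest
    · simp [h1]
    · by_cases h2 : t = a <;> simp [h1, h2, PySem.Dict.getD_insert]

-- getD after the conditional append-to-list fold (A's incoming/outgoing, B's parents)
lemma cmm_appendFold_getD (c : String × String → Bool) (k v : String × String → String)
    (edges : List (String × String)) (d : PySem.Dict String (List String)) (t : String) :
    ((edges.foldl (fun d e => if c e then d.insert (k e) (d.getD (k e) [] ++ [v e]) else d) d).getD t [])
    = d.getD t [] ++ (((edges.filter c).filter (fun e => k e == t)).map v) := by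
  induction edges generalizing d with
  | nil => simp
  | cons e rest ih =>
    simp only [List.foldl_cons, List.filter_cons]
    by_cases hc : c e
    · simp only [hc, if_true, ih, List.filter_cons]
      by_cases hk : k e == t
      · have hkt : k e = t := by simpa using hk
        simp [hk, PySem.Dict.getD_insert, hkt]
      · have hkt : ¬ (t = k e) := by
          intro h; subst h; simp at hk
        simp [hk, PySem.Dict.getD_insert, hkt]
    · simp only [hc, if_false, Bool.false_eq_true, ih]

-- getD after A's indegree fold
lemma cmm_indegFold_getD (c : String × String → Bool)
    (edges : List (String × String)) (d : PySem.Dict String Int) (t : String) :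
    ((edges.foldl (fun d e => if c e then d.insert e.2 (d.getD e.2 0 + 1) else d) d).getD t 0)
    = d.getD t 0 + (((edges.filter c).map (fun e => e.2)).count t : Int) := by
  have h1 : (edges.foldl (fun d e => if c e then d.insert e.2 (d.getD e.2 0 + 1) else d) d)
      = (((edges.filter c).map (fun e => e.2)).foldl (fun d x => d.insert x (d.getD x 0 + 1)) d) := by
    rw [List.foldl_map, List.foldl_filter]
  rw [h1, PySem.Dict.getD_foldl_insert_add_one]

-- the triple fold of A splits into its three components
lemma cmm_tripleFold (c : String × String → Bool)
    (f g : PySem.Dict String (List String) → String × String → PySem.Dict String (List String))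
    (h : PySem.Dict String Int → String × String → PySem.Dict String Int)
    (edges : List (String × String)) (a b : PySem.Dict String (List String)) (k : PySem.Dict String Int) :
    (edges.foldl (fun st e => if c e then (f st.1 e, g st.2.1 e, h st.2.2 e) else st) (a, b, k))
    = (edges.foldl (fun x e => if c e then f x e else x) a,
       edges.foldl (fun x e => if c e then g x e else x) b,
       edges.foldl (fun x e => if c e then h x e else x) k) := by
  induction edges generalizing a b k with
  | nil => rfl
  | cons e rest ih =>
    simp only [List.foldl_cons]
    by_cases hc : c e <;> simp [hc, ih]

-- multiplicity swap: occurrences of u among t's parents = occurrences of t among u's children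
lemma cmm_count_swap (tasks : List String) (edges : List (String × String)) (t u : String) :
    (cmmPl tasks edges t).count u = (cmmOl tasks edges u).count t := by
  simp only [cmmPl, cmmOl, List.count_eq_countP, List.countP_map, List.countP_filter]
  apply List.countP_congr
  intro e _
  simp only [Function.comp_apply]
  constructor <;> (intro h; simp_all [Bool.and_comm])

lemma cmm_ol_mem_tasks (tasks : List String) (edges : List (String × String)) (t p : String)
    (h : p ∈ cmmOl tasks edges t) : p ∈ tasks := by
  simp only [cmmOl, cmmEdgesF, List.mem_map, List.mem_filter] at h
  obtain ⟨e, ⟨⟨_, he⟩, _⟩, rfl⟩ := h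
  have := (Bool.and_eq_true _ _).mp he
  simpa using this.2

-- splitting the unprocessed-parents count when task moves into topo
lemma cmm_countP_snoc (l topo : List String) (task : String) (h : task ∉ topo) :
    l.countP (fun p => !topo.contains p)
    = l.countP (fun p => !(topo ++ [task]).contains p) + l.count task := by
  induction l with
  | nil => simp
  | cons a rest ih =>
    simp only [List.countP_cons, List.count_cons, ih]
    by_cases ha : a = task
    · subst ha
      simp [h]
      omega
    · by_cases hm : a ∈ topo <;> simp [hm, ha] <;> omega

-- pyMaxInt facts
lemma pyMaxInt_ge (l : List Int) (y : Int) (hy : y ∈ l) : y ≤ pyMaxInt l := by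
  match l with
  | x :: xs =>
    simp only [pyMaxInt]
    rcases List.mem_cons.mp hy with rfl | hmem
    · exact (PySem.List.le_foldl_max xs y).1
    · exact (PySem.List.le_foldl_max xs x).2 y hmem

lemma pyMaxInt_mem (l : List Int) (h : l ≠ []) : pyMaxInt l ∈ l := by
  match l with
  | x :: xs =>
    simp only [pyMaxInt]
    rcases PySem.List.foldl_max_mem xs x with h1 | h1
    · rw [h1]; exact List.mem_cons_self ..
    · exact List.mem_cons_of_mem _ h1

lemma pyMaxInt_perm (l1 l2 : List Int) (h : l1.Perm l2) : pyMaxInt l1 = pyMaxInt l2 := by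
  match l1, l2 with
  | [], l2 => rw [List.Perm.nil_eq h]
  | x :: xs, l2 =>
    have h2 : l2 ≠ [] := by
      intro hnil; subst hnil; exact absurd h.symm (by simp)
    apply le_antisymm
    · exact pyMaxInt_ge l2 _ (h.mem_iff.mp (pyMaxInt_mem _ (by simp)))
    · exact pyMaxInt_ge (x :: xs) _ (h.mem_iff.mpr (pyMaxInt_mem _ h2))

lemma cmm_maxD_eq_pyMaxInt (l : List Int) :
    PySem.List.maxD l (fun x => x) 0 = if l.isEmpty then 0 else pyMaxInt l := by
  match l with
  | [] => rfl
  | x :: xs =>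
    simp only [List.isEmpty_cons, if_false, Bool.false_eq_true]
    show (PySem.List.max? (x :: xs) (fun x => x)).getD 0 = pyMaxInt (x :: xs)
    rw [PySem.List.max?_id_cons]
    rfl

-- strictly sorted helpers
lemma cmm_sorted_strict (xs : List String) (h : xs.Nodup) :
    (PySem.List.sorted xs (fun x => x)).Pairwise (· < ·) := by
  have h1 := PySem.List.sorted_pairwise xs (fun x => x)
  have h2 : (PySem.List.sorted xs (fun x => x)).Nodup :=
    (PySem.List.sorted_perm xs (fun x => x) false).nodup_iff.mpr h
  have := h1.and h2
  exact this.imp (fun hab => lt_of_le_of_ne hab.1 hab.2)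

lemma cmm_pairwise_nodup (xs : List String) (h : xs.Pairwise (· < ·)) : xs.Nodup :=
  h.imp (fun hab => ne_of_lt hab)

lemma cmm_sorted_eq (l1 l2 : List String) (h1 : l1.Pairwise (· < ·)) (h2 : l2.Pairwise (· < ·))
    (hm : ∀ t, t ∈ l1 ↔ t ∈ l2) : l1 = l2 := by
  have hperm : l1.Perm l2 :=
    (List.perm_ext_iff_of_nodup (cmm_pairwise_nodup _ h1) (cmm_pairwise_nodup _ h2)).mpr hm
  exact List.Perm.eq_of_pairwise (fun a b _ _ hab hba => le_antisymm hab hba)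
    (h1.imp le_of_lt) (h2.imp le_of_lt) hperm

-- the inner neighbour fold of one Kahn step: decrements the indegrees by the processed
-- edge occurrences and enqueues exactly the tasks whose parents are now all in topo ++ [task]
lemma cmm_innerFold (tasks : List String) (edges : List (String × String))
    (topo : List String) (task : String)
    (hnotin : task ∉ topo)
    (hnotself : task ∉ cmmPl tasks edges task)
    (hclosed : ∀ t ∈ topo, ∀ p ∈ cmmPl tasks edges t, p ∈ topo) :
    ∀ (R q : List String) (ind : PySem.Dict String Int),
      (∀ u ∈ R, u ∈ tasks ∧ task ∈ cmmPl tasks edges u) →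
      q.Pairwise (· < ·) →
      (∀ t ∈ tasks, ind.getD t 0 = ((cmmPl tasks edges t).countP (fun p => !(topo ++ [task]).contains p) : Int) + R.count t) →
      (∀ t, t ∈ q ↔ t ∈ tasks ∧ t ∉ topo ++ [task] ∧ ind.getD t 0 = 0) →
      ((R.foldl (fun (st : List String × PySem.Dict String Int) nb =>
            let ind := st.2.insert nb (st.2.getD nb 0 - 1)
            if ind.getD nb 0 == 0 then (PySem.List.sorted (st.1 ++ [nb]) (fun x => x), ind)
            else (st.1, ind)) (q, ind)).1.Pairwise (· < ·) ∧
       (∀ t ∈ tasks, (R.foldl (fun (st : List String × PySem.Dict String Int) nb =>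
            let ind := st.2.insert nb (st.2.getD nb 0 - 1)
            if ind.getD nb 0 == 0 then (PySem.List.sorted (st.1 ++ [nb]) (fun x => x), ind)
            else (st.1, ind)) (q, ind)).2.getD t 0
          = ((cmmPl tasks edges t).countP (fun p => !(topo ++ [task]).contains p) : Int)) ∧
       (∀ t, t ∈ (R.foldl (fun (st : List String × PySem.Dict String Int) nb =>
            let ind := st.2.insert nb (st.2.getD nb 0 - 1)
            if ind.getD nb 0 == 0 then (PySem.List.sorted (st.1 ++ [nb]) (fun x => x), ind)
            else (st.1, ind)) (q, ind)).1
          ↔ t ∈ tasks ∧ t ∉ topo ++ [task] ∧ ∀ p ∈ cmmPl tasks edges t, p ∈ topo ++ [task])) := by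
  intro R
  induction R with
  | nil =>
    intro q ind hu hqs hind hq
    simp only [List.foldl_nil]
    refine ⟨hqs, ?_, ?_⟩
    · intro t ht; simpa using hind t ht
    · intro t
      rw [hq t]
      constructor
      · rintro ⟨h1, h2, h3⟩
        refine ⟨h1, h2, ?_⟩
        have h4 := hind t h1
        simp only [List.count_nil, Nat.cast_zero, add_zero] at h4
        rw [h4] at h3
        have h5 : (cmmPl tasks edges t).countP (fun p => !(topo ++ [task]).contains p) = 0 := by
          exact_mod_cast h3
        intro p hp
        have h10 := List.countP_eq_zero.mp h5 p hp
        have h9 : (topo ++ [task]).contains p = true := by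
          revert h10
          cases hcc : (topo ++ [task]).contains p <;> simp
        simpa using h9
      · rintro ⟨h1, h2, h3⟩
        refine ⟨h1, h2, ?_⟩
        have h4 := hind t h1
        simp only [List.count_nil, Nat.cast_zero, add_zero] at h4
        rw [h4]
        have h5 : (cmmPl tasks edges t).countP (fun p => !(topo ++ [task]).contains p) = 0 := by
          apply List.countP_eq_zero.mpr
          intro p hp
          have h9 : (topo ++ [task]).contains p = true := by
            have := h3 p hp
            exact List.contains_iff_mem.mpr this
          rw [h9, Bool.not_true]
          simp
        exact_mod_cast congrArg (Nat.cast : Nat → Int) h5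
  | cons nb R' ih =>
    intro q ind hu hqs hind hq
    obtain ⟨hnbtasks, hnbpl⟩ := hu nb (List.mem_cons_self ..)
    -- nb is not yet enqueued: its indegree is still positive
    have hcountpos : 0 < List.count nb (nb :: R') := by simp
    have hindnb : ind.getD nb 0 =
        ((cmmPl tasks edges nb).countP (fun p => !(topo ++ [task]).contains p) : Int) + List.count nb (nb :: R') :=
      hind nb hnbtasks
    have hnbne : ind.getD nb 0 ≠ 0 := by
      rw [hindnb]
      have : (0:Int) ≤ ((cmmPl tasks edges nb).countP (fun p => !(topo ++ [task]).contains p) : Int) := by positivity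
      have h2 : (0:Int) < (List.count nb (nb :: R') : Int) := by exact_mod_cast hcountpos
      omega
    have hnbnotq : nb ∉ q := by
      intro hmem
      exact hnbne ((hq nb).mp hmem).2.2
    -- nb is not in topo ++ [task]
    have hnbnotin : nb ∉ topo ++ [task] := by
      intro hmem
      rcases List.mem_append.mp hmem with h1 | h1
      · exact hnotin (hclosed nb h1 task hnbpl)
      · have h2 : nb = task := by simpa using h1
        subst h2; exact hnotself hnbpl
    -- the new indegree dictionary
    have hind' : ∀ t ∈ tasks, (ind.insert nb (ind.getD nb 0 - 1)).getD t 0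
        = ((cmmPl tasks edges t).countP (fun p => !(topo ++ [task]).contains p) : Int) + List.count t R' := by
      intro t ht
      rw [PySem.Dict.getD_insert]
      by_cases hteq : t = nb
      · subst hteq
        rw [if_pos rfl, hindnb]
        have hc : List.count t (t :: R') = List.count t R' + 1 := List.count_cons_self ..
        rw [hc]
        push_cast
        ring
      · rw [if_neg hteq]
        have hne2 : ¬ nb = t := fun h => hteq h.symm
        have h6 := hind t ht
        have hc : List.count t (nb :: R') = List.count t R' := by simp [List.count_cons, hne2]
        rw [hc] at h6
        exact h6
    simp only [List.foldl_cons]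
    by_cases hzero : (ind.insert nb (ind.getD nb 0 - 1)).getD nb 0 == 0
    · -- nb's indegree reached 0: it is appended and the queue re-sorted
      have hzero' : (ind.insert nb (ind.getD nb 0 - 1)).getD nb 0 = 0 := by simpa using hzero
      have hq'nodup : (q ++ [nb]).Nodup := by
        simp only [List.nodup_append]
        refine ⟨cmm_pairwise_nodup q hqs, List.nodup_singleton nb, ?_⟩
        intro x hx y hy
        have hxe : y = nb := by simpa using hy
        subst hxe
        exact fun hxy => hnbnotq (hxy ▸ hx)
      have hsorted' := cmm_sorted_strict (q ++ [nb]) hq'nodup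
      have hq' : ∀ t, t ∈ PySem.List.sorted (q ++ [nb]) (fun x => x) ↔
          t ∈ tasks ∧ t ∉ topo ++ [task] ∧ (ind.insert nb (ind.getD nb 0 - 1)).getD t 0 = 0 := by
        intro t
        rw [PySem.List.mem_sorted, List.mem_append, List.mem_singleton]

        constructor
        · rintro (h1 | rfl)
          · obtain ⟨a1, a2, a3⟩ := (hq t).mp h1
            refine ⟨a1, a2, ?_⟩
            rw [PySem.Dict.getD_insert, if_neg (by rintro rfl; exact hnbnotq h1)]
            exact a3
          · exact ⟨hnbtasks, hnbnotin, hzero'⟩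
        · rintro ⟨a1, a2, a3⟩
          by_cases hteq : t = nb
          · right; exact hteq
          · left
            rw [PySem.Dict.getD_insert, if_neg hteq] at a3
            exact (hq t).mpr ⟨a1, a2, a3⟩
      have := ih (PySem.List.sorted (q ++ [nb]) (fun x => x)) (ind.insert nb (ind.getD nb 0 - 1))
        (fun u hu' => hu u (List.mem_cons_of_mem _ hu')) hsorted' hind' hq'
      simpa only [hzero, if_true] using this
    · -- nb's indegree is still positive: the queue is unchanged
      have hzero' : (ind.insert nb (ind.getD nb 0 - 1)).getD nb 0 ≠ 0 := by simpa using hzero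
      have hq' : ∀ t, t ∈ q ↔
          t ∈ tasks ∧ t ∉ topo ++ [task] ∧ (ind.insert nb (ind.getD nb 0 - 1)).getD t 0 = 0 := by
        intro t
        by_cases hteq : t = nb
        · subst hteq
          constructor
          · intro h1; exact absurd h1 hnbnotq
          · rintro ⟨_, _, a3⟩; exact absurd a3 hzero'
        · rw [hq t, PySem.Dict.getD_insert, if_neg hteq]
      have := ih q (ind.insert nb (ind.getD nb 0 - 1))
        (fun u hu' => hu u (List.mem_cons_of_mem _ hu')) hqs hind' hq'
      simpa only [hzero, if_false] using this

lemma cmm_not_contains_iff (l : List String) (p : String) : ((!l.contains p) = true) ↔ p ∉ l := by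
  simp

-- unfolding equations of cmmSelectLoop
lemma selNil (parD : PySem.Dict String (List String)) (dd : PySem.Dict String Int) (finish : PySem.Dict String Int) :
    cmmSelectLoop parD dd [] finish = some finish := by
  rw [cmmSelectLoop]

lemma selStall (parD : PySem.Dict String (List String)) (dd : PySem.Dict String Int)
    (remaining : List String) (finish : PySem.Dict String Int) (h : remaining ≠ [])
    (hf : remaining.filter (fun t => (parD.getD t []).all (fun p => finish.contains p)) = []) :
    cmmSelectLoop parD dd remaining finish = none := by
  cases remaining with
  | nil => exact absurd rfl h
  | cons r rs =>
    rw [cmmSelectLoop.eq_def]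
    split
    · next heq => exact absurd heq (by simp)
    · next head tail heq =>
        injection heq with e1 e2
        subst e1; subst e2
        split
        · rfl
        · next t2 rest2 hr =>
            rw [hf] at hr
            simp at hr

lemma selStep (parD : PySem.Dict String (List String)) (dd : PySem.Dict String Int)
    (remaining : List String) (finish : PySem.Dict String Int) (task : String) (rest : List String)
    (hf : remaining.filter (fun t => (parD.getD t []).all (fun p => finish.contains p)) = task :: rest) :
    cmmSelectLoop parD dd remaining finish
    = cmmSelectLoop parD dd (remaining.erase task)
        (finish.insert task (dd.getD task 0 +
          PySem.List.maxD ((parD.getD task []).map (fun p => finish.getD p 0)) (fun x => x) 0)) := by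
  cases remaining with
  | nil => simp at hf
  | cons r rs =>
    rw [cmmSelectLoop.eq_def]
    split
    · next heq => exact absurd heq (by simp)
    · next head tail heq =>
        injection heq with e1 e2
        subst e1; subst e2
        split
        · next hr =>
            rw [hf] at hr
            simp at hr
        · next t2 rest2 hr =>
            rw [hf] at hr
            injection hr with h1 h2
            subst h1
            rfl

-- the synchronized simulation of A's Kahn loop and B's selection loop
lemma cmm_sim (tasks : List String) (edges : List (String × String))
    (hnd : tasks.Nodup)
    (dd : PySem.Dict String Int) (outD parD : PySem.Dict String (List String))
    (hout : ∀ t, outD.getD t [] = cmmOl tasks edges t)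
    (hpar : ∀ t, parD.getD t [] = cmmPl tasks edges t) :
    ∀ (fuel : Nat) (queue topo remaining : List String)
      (indeg finish : PySem.Dict String Int),
      tasks.length ≤ fuel + topo.length →
      topo.Nodup → (∀ t ∈ topo, t ∈ tasks) →
      (∀ t ∈ topo, ∀ p ∈ cmmPl tasks edges t, p ∈ topo) →
      cmmPrec (cmmPl tasks edges) [] topo →
      (∀ t ∈ tasks, indeg.getD t 0 = ((cmmPl tasks edges t).countP (fun p => !topo.contains p) : Int)) →
      queue.Pairwise (· < ·) →
      (∀ t, t ∈ queue ↔ t ∈ tasks ∧ t ∉ topo ∧ ∀ p ∈ cmmPl tasks edges t, p ∈ topo) →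
      remaining.Pairwise (· < ·) →
      (∀ t, t ∈ remaining ↔ t ∈ tasks ∧ t ∉ topo) →
      finish.keys = topo →
      (∀ t ∈ topo, finish.getD t 0 = dd.getD t 0 +
        PySem.List.maxD ((cmmPl tasks edges t).map (fun p => finish.getD p 0)) (fun x => x) 0) →
      ((cmmKahnLoop outD fuel queue topo indeg).length = tasks.length →
        ∃ finF, cmmSelectLoop parD dd remaining finish = some finF ∧
          finF.keys = cmmKahnLoop outD fuel queue topo indeg ∧
          (cmmKahnLoop outD fuel queue topo indeg).Nodup ∧
          (∀ t, t ∈ cmmKahnLoop outD fuel queue topo indeg ↔ t ∈ tasks) ∧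
          cmmPrec (cmmPl tasks edges) [] (cmmKahnLoop outD fuel queue topo indeg) ∧
          (∀ t ∈ tasks, finF.getD t 0 = dd.getD t 0 +
            PySem.List.maxD ((cmmPl tasks edges t).map (fun p => finF.getD p 0)) (fun x => x) 0)) ∧
      ((cmmKahnLoop outD fuel queue topo indeg).length ≠ tasks.length →
        cmmSelectLoop parD dd remaining finish = none) := by
  intro fuel
  induction fuel with
  | zero =>
    intro queue topo remaining indeg finish hfuel hndt hsub hclosed hprec hind hqs hq hrs hr hkeys hfin
    simp only [cmmKahnLoop]
    have hlen : topo.length = tasks.length := by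
      have h1 := (List.Nodup.subperm hndt hsub).length_le
      omega
    have hmemiff : ∀ t, t ∈ topo ↔ t ∈ tasks := by
      have hperm := (List.Nodup.subperm hndt hsub).perm_of_length_le (by omega)
      exact fun t => hperm.mem_iff
    have hremnil : remaining = [] := by
      cases hrem2 : remaining with
      | nil => rfl
      | cons a as =>
        have h2 := (hr a).mp (by rw [hrem2]; exact List.mem_cons_self ..)
        exact absurd ((hmemiff a).mpr h2.1) h2.2
    constructor
    · intro _
      refine ⟨finish, ?_, hkeys, hndt, hmemiff, hprec, fun t ht => hfin t ((hmemiff t).mpr ht)⟩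
      rw [hremnil]; exact selNil parD dd finish
    · intro hne; exact absurd hlen hne
  | succ fuel ih =>
    intro queue topo remaining indeg finish hfuel hndt hsub hclosed hprec hind hqs hq hrs hr hkeys hfin
    cases queue with
    | nil =>
      simp only [cmmKahnLoop]
      cases hrem2 : remaining with
      | nil =>
        subst hrem2
        have hmemiff : ∀ t, t ∈ topo ↔ t ∈ tasks := by
          intro t
          constructor
          · exact fun h => hsub t h
          · intro h
            by_contra hcon
            have h2 := (hr t).mpr ⟨h, hcon⟩
            simp at h2
        have hlen : topo.length = tasks.length :=
          ((List.perm_ext_iff_of_nodup hndt hnd).mpr hmemiff).length_eq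
        constructor
        · intro _
          exact ⟨finish, selNil parD dd finish, hkeys, hndt, hmemiff, hprec, fun t ht => hfin t ((hmemiff t).mpr ht)⟩
        · intro hne; exact absurd hlen hne
      | cons a as =>
        subst hrem2
        have hfilnil : (a :: as).filter (fun t => (parD.getD t []).all (fun p => finish.contains p)) = [] := by
          rw [List.filter_eq_nil_iff]
          intro t ht hpred
          have h1 := (hr t).mp ht
          have hparents : ∀ p ∈ cmmPl tasks edges t, p ∈ topo := by
            intro p hp
            have h2 := List.all_eq_true.mp hpred p (by rw [hpar t]; exact hp)
            have h3 := (PySem.Dict.contains_iff_mem_keys finish p).mp h2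
            rw [hkeys] at h3
            exact h3
          have h4 : t ∈ ([] : List String) := (hq t).mpr ⟨h1.1, h1.2, hparents⟩
          simp at h4
        have hBnone : cmmSelectLoop parD dd (a :: as) finish = none :=
          selStall parD dd (a :: as) finish (by simp) hfilnil
        have halen : topo.length ≠ tasks.length := by
          have h1 := (hr a).mp (List.mem_cons_self ..)
          intro heq
          have hperm := (List.Nodup.subperm hndt hsub).perm_of_length_le (by omega)
          exact h1.2 (hperm.mem_iff.mpr h1.1)
        exact ⟨fun h => absurd h halen, fun _ => hBnone⟩
    | cons task rest =>
      obtain ⟨htask_tasks, htask_topo, htask_par⟩ := (hq task).mp (List.mem_cons_self ..)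
      have hnotself : task ∉ cmmPl tasks edges task := fun h => htask_topo (htask_par task h)
      have hqrest : rest.Pairwise (· < ·) := (List.pairwise_cons.mp hqs).2
      have hlt : ∀ t ∈ rest, task < t := (List.pairwise_cons.mp hqs).1
      -- entry facts for the inner neighbour fold
      have hu : ∀ u ∈ PySem.List.sorted (outD.getD task []) (fun x => x), u ∈ tasks ∧ task ∈ cmmPl tasks edges u := by
        intro u hu1
        rw [PySem.List.mem_sorted, hout task] at hu1
        refine ⟨cmm_ol_mem_tasks tasks edges task u hu1, ?_⟩
        have hcount : 0 < (cmmPl tasks edges u).count task := by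
          rw [cmm_count_swap]
          exact List.count_pos_iff.mpr hu1
        exact List.count_pos_iff.mp hcount
      have hindentry : ∀ t ∈ tasks, indeg.getD t 0 =
          ((cmmPl tasks edges t).countP (fun p => !(topo ++ [task]).contains p) : Int)
          + List.count t (PySem.List.sorted (outD.getD task []) (fun x => x)) := by
        intro t ht
        rw [hind t ht, cmm_countP_snoc _ topo task htask_topo]
        have hc1 : List.count t (PySem.List.sorted (outD.getD task []) (fun x => x))
            = List.count t (cmmOl tasks edges task) := by
          rw [List.Perm.count_eq (PySem.List.sorted_perm (outD.getD task []) (fun x => x) false), hout task]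
        rw [hc1, ← cmm_count_swap]
        push_cast
        ring
      have hqentry : ∀ t, t ∈ rest ↔ t ∈ tasks ∧ t ∉ topo ++ [task] ∧ indeg.getD t 0 = 0 := by
        intro t
        constructor
        · intro htr
          have htq := (hq t).mp (List.mem_cons_of_mem _ htr)
          have hne : t ≠ task := (ne_of_gt (hlt t htr))
          refine ⟨htq.1, ?_, ?_⟩
          · intro hmem
            rcases List.mem_append.mp hmem with h | h
            · exact htq.2.1 h
            · exact hne (by simpa using h)
          · rw [hind t htq.1]
            have h5 : (cmmPl tasks edges t).countP (fun p => !topo.contains p) = 0 := by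
              apply List.countP_eq_zero.mpr
              intro p hp
              have h9 : topo.contains p = true := List.contains_iff_mem.mpr (htq.2.2 p hp)
              rw [h9, Bool.not_true]
              simp
            rw [h5]
            simp
        · rintro ⟨h1, h2, h3⟩
          have hnt : t ∉ topo := fun h => h2 (List.mem_append.mpr (Or.inl h))
          have hne : t ≠ task := fun h => h2 (List.mem_append.mpr (Or.inr (by simp [h])))
          have hcount0 : (cmmPl tasks edges t).countP (fun p => !topo.contains p) = 0 := by
            have h4 := hind t h1
            rw [h4] at h3
            exact_mod_cast h3
          have hpar0 : ∀ p ∈ cmmPl tasks edges t, p ∈ topo := by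
            intro p hp
            have h10 := List.countP_eq_zero.mp hcount0 p hp
            by_contra hcon
            exact h10 ((cmm_not_contains_iff topo p).mpr hcon)
          have h6 : t ∈ task :: rest := (hq t).mpr ⟨h1, hnt, hpar0⟩
          rcases List.mem_cons.mp h6 with h | h
          · exact absurd h hne
          · exact h
      obtain ⟨hfq, hfind, hfmem⟩ := cmm_innerFold tasks edges topo task htask_topo hnotself hclosed
        (PySem.List.sorted (outD.getD task []) (fun x => x)) rest indeg hu hqrest hindentry hqentry
      -- B's ready list is exactly A's queue
      have hready : remaining.filter (fun t => (parD.getD t []).all (fun p => finish.contains p)) = task :: rest := by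
        apply cmm_sorted_eq
        · exact hrs.sublist List.filter_sublist
        · exact hqs
        · intro t
          rw [List.mem_filter]
          constructor
          · rintro ⟨h1, h2⟩
            have h3 := (hr t).mp h1
            refine (hq t).mpr ⟨h3.1, h3.2, ?_⟩
            intro p hp
            have h4 := List.all_eq_true.mp h2 p (by rw [hpar t]; exact hp)
            have h5 := (PySem.Dict.contains_iff_mem_keys finish p).mp h4
            rw [hkeys] at h5
            exact h5
          · intro h1
            have h2 := (hq t).mp h1
            refine ⟨(hr t).mpr ⟨h2.1, h2.2.1⟩, ?_⟩
            apply List.all_eq_true.mpr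
            intro p hp
            rw [hpar t] at hp
            exact (PySem.Dict.contains_iff_mem_keys finish p).mpr (hkeys ▸ h2.2.2 p hp)
      -- unfold one step of both loops
      simp only [cmmKahnLoop]
      rw [selStep parD dd remaining finish task rest hready]
      -- invariants for the recursive call
      have hndt' : (topo ++ [task]).Nodup := by
        simp only [List.nodup_append]
        refine ⟨hndt, List.nodup_singleton task, ?_⟩
        intro x hx y hy
        have hxe : y = task := by simpa using hy
        subst hxe
        exact fun hxy => htask_topo (hxy ▸ hx)
      have hsub' : ∀ t ∈ topo ++ [task], t ∈ tasks := by
        intro t ht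
        rcases List.mem_append.mp ht with h | h
        · exact hsub t h
        · have he : t = task := by simpa using h
          subst he; exact htask_tasks
      have hclosed' : ∀ t ∈ topo ++ [task], ∀ p ∈ cmmPl tasks edges t, p ∈ topo ++ [task] := by
        intro t ht p hp
        rcases List.mem_append.mp ht with h | h
        · exact List.mem_append.mpr (Or.inl (hclosed t h p hp))
        · have he : t = task := by simpa using h
          subst he
          exact List.mem_append.mpr (Or.inl (htask_par p hp))
      have hprec' : cmmPrec (cmmPl tasks edges) [] (topo ++ [task]) := by
        apply cmmPrec_snoc _ _ _ _ hprec
        intro p hp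
        simpa using htask_par p hp
      have hrs' : (remaining.erase task).Pairwise (· < ·) := hrs.sublist (List.erase_sublist)
      have hndrem : remaining.Nodup := cmm_pairwise_nodup _ hrs
      have hr' : ∀ t, t ∈ remaining.erase task ↔ t ∈ tasks ∧ t ∉ topo ++ [task] := by
        intro t
        rw [List.Nodup.mem_erase_iff hndrem, hr t]
        constructor
        · rintro ⟨hne, h1, h2⟩
          refine ⟨h1, ?_⟩
          intro hmem
          rcases List.mem_append.mp hmem with h | h
          · exact h2 h
          · exact hne (by simpa using h)
        · rintro ⟨h1, h2⟩
          have hnt : t ∉ topo := fun h => h2 (List.mem_append.mpr (Or.inl h))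
          have hne : t ≠ task := fun h => h2 (List.mem_append.mpr (Or.inr (by simp [h])))
          exact ⟨hne, h1, hnt⟩
      have hcontf : finish.contains task = false := by
        cases hc : finish.contains task with
        | false => rfl
        | true =>
          have h7 := (PySem.Dict.contains_iff_mem_keys finish task).mp hc
          rw [hkeys] at h7
          exact absurd h7 htask_topo
      have hkeys' : (finish.insert task (dd.getD task 0 +
          PySem.List.maxD ((parD.getD task []).map (fun p => finish.getD p 0)) (fun x => x) 0)).keys
          = topo ++ [task] := by
        rw [PySem.Dict.keys_insert_of_not_contains _ _ hcontf, hkeys]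
      have hfin' : ∀ t ∈ topo ++ [task],
          (finish.insert task (dd.getD task 0 +
            PySem.List.maxD ((parD.getD task []).map (fun p => finish.getD p 0)) (fun x => x) 0)).getD t 0
          = dd.getD t 0 + PySem.List.maxD ((cmmPl tasks edges t).map (fun p =>
              (finish.insert task (dd.getD task 0 +
                PySem.List.maxD ((parD.getD task []).map (fun p => finish.getD p 0)) (fun x => x) 0)).getD p 0))
              (fun x => x) 0 := by
        intro t ht
        rcases List.mem_append.mp ht with h | h
        · have hne : ¬ (t = task) := fun he => htask_topo (he ▸ h)
          rw [PySem.Dict.getD_insert, if_neg hne, hfin t h]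
          congr 2
          apply List.map_congr_left
          intro p hp
          have hpt : p ∈ topo := hclosed t h p hp
          have hpne : ¬ (p = task) := fun he => htask_topo (he ▸ hpt)
          rw [PySem.Dict.getD_insert, if_neg hpne]
        · have he : t = task := by simpa using h
          subst he
          rw [PySem.Dict.getD_insert, if_pos rfl, hpar t]
          congr 2
          apply List.map_congr_left
          intro p hp
          have hpt : p ∈ topo := htask_par p hp
          have hpne : ¬ (p = t) := fun he => htask_topo (he ▸ hpt)
          rw [PySem.Dict.getD_insert, if_neg hpne]
      exact ih _ (topo ++ [task]) (remaining.erase task) _ _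
        (by simp only [List.length_append, List.length_singleton]; omega)
        hndt' hsub' hclosed' hprec' hfind hfq hfmem hrs' hr' hkeys' hfin'

-- the earliest_start pass of A computes finish − duration
lemma cmm_est (tasks : List String) (edges : List (String × String))
    (dd : PySem.Dict String Int) (incomingD : PySem.Dict String (List String))
    (hin : ∀ t, incomingD.getD t [] = cmmPl tasks edges t)
    (finF : PySem.Dict String Int)
    (hrec : ∀ t ∈ tasks, finF.getD t 0 = dd.getD t 0 +
      PySem.List.maxD ((cmmPl tasks edges t).map (fun p => finF.getD p 0)) (fun x => x) 0) :
    ∀ (suffix pre : List String) (d : PySem.Dict String Int),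
      (pre ++ suffix).Nodup →
      (∀ t ∈ suffix, t ∈ tasks) →
      cmmPrec (cmmPl tasks edges) pre suffix →
      (∀ t, d.getD t 0 = if t ∈ pre then finF.getD t 0 - dd.getD t 0 else 0) →
      (∀ t, (suffix.foldl (fun d t => if (incomingD.getD t []).isEmpty then d
              else d.insert t (pyMaxInt ((incomingD.getD t []).map (fun p => d.getD p 0 + dd.getD p 0)))) d).getD t 0
           = if t ∈ pre ++ suffix then finF.getD t 0 - dd.getD t 0 else 0) := by
  intro suffix
  induction suffix with
  | nil => intro pre d _ _ _ hd t; simpa using hd t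
  | cons a rest ih =>
    intro pre d hnodup hmem hprec hd t
    have hataska : a ∈ tasks := hmem a (List.mem_cons_self ..)
    have hanotpre : a ∉ pre :=
      fun hm => (List.disjoint_of_nodup_append hnodup) hm (List.mem_cons_self ..)
    have harec := hrec a hataska
    -- the one-step dictionary satisfies the invariant for pre ++ [a]
    have hd1 : ∀ t, ((if (incomingD.getD a []).isEmpty then d
          else d.insert a (pyMaxInt ((incomingD.getD a []).map (fun p => d.getD p 0 + dd.getD p 0)))).getD t 0)
        = if t ∈ pre ++ [a] then finF.getD t 0 - dd.getD t 0 else 0 := by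
      intro t
      rw [hin a] at *
      by_cases hempty : (cmmPl tasks edges a).isEmpty
      · have hplnil : cmmPl tasks edges a = [] := by simpa [List.isEmpty_iff] using hempty
        simp only [hempty, if_true]
        rw [hd t]
        by_cases hta : t = a
        · subst hta
          rw [hplnil] at harec
          simp only [List.map_nil, cmm_maxD_eq_pyMaxInt, List.isEmpty_nil, if_true] at harec
          simp [hanotpre, harec]
        · simp [List.mem_append, hta]
      · simp only [hempty, if_false, Bool.false_eq_true, PySem.Dict.getD_insert]
        by_cases hta : t = a
        · subst hta
          simp only [List.mem_append, List.mem_singleton, or_true, if_true, if_pos rfl]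
          rw [harec]
          have hmapeq : (cmmPl tasks edges t).map (fun p => d.getD p 0 + dd.getD p 0)
              = (cmmPl tasks edges t).map (fun p => finF.getD p 0) := by
            apply List.map_congr_left
            intro p hp
            rw [hd p, if_pos (hprec.1 p hp)]
            ring
          rw [hmapeq, cmm_maxD_eq_pyMaxInt]
          have : ((cmmPl tasks edges t).map (fun p => finF.getD p 0)).isEmpty = false := by
            simp only [List.isEmpty_eq_false_iff, ne_eq, List.map_eq_nil_iff]
            simpa [List.isEmpty_iff] using hempty
          rw [this]
          simp
        · rw [hd t]
          simp [List.mem_append, hta]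
    have hstep : ((a :: rest).foldl (fun d t => if (incomingD.getD t []).isEmpty then d
            else d.insert t (pyMaxInt ((incomingD.getD t []).map (fun p => d.getD p 0 + dd.getD p 0)))) d)
        = (rest.foldl (fun d t => if (incomingD.getD t []).isEmpty then d
            else d.insert t (pyMaxInt ((incomingD.getD t []).map (fun p => d.getD p 0 + dd.getD p 0))))
            (if (incomingD.getD a []).isEmpty then d
              else d.insert a (pyMaxInt ((incomingD.getD a []).map (fun p => d.getD p 0 + dd.getD p 0))))) := by
      simp [List.foldl_cons]
    rw [hstep]
    have hres := ih (pre ++ [a])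
      (if (incomingD.getD a []).isEmpty then d
        else d.insert a (pyMaxInt ((incomingD.getD a []).map (fun p => d.getD p 0 + dd.getD p 0))))
      (by simpa using hnodup)
      (fun t ht => hmem t (List.mem_cons_of_mem _ ht))
      hprec.2 hd1 t
    rw [hres]
    simp [List.mem_append]


-- the assembled equivalence on duplicate-free task lists
lemma cmm_main (tasks : List String) (edges : List (String × String)) (durations : List (String × Int))
    (hpre : tasks.Nodup) :
    compute_minimal_makespan tasks edges durations = compute_minimal_makespan_alt tasks edges durations := by
  by_cases hcond : (tasks.isEmpty || tasks.any (fun t => !((PySem.Dict.mk durations).contains t))) = true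
  · simp only [compute_minimal_makespan, compute_minimal_makespan_alt, hcond, if_true]
  · simp only [compute_minimal_makespan, compute_minimal_makespan_alt, hcond, Bool.false_eq_true, if_false]
    have hst : (edges.foldl
          (fun (st : PySem.Dict String (List String) × PySem.Dict String (List String) × PySem.Dict String Int) e =>
            if tasks.contains e.1 && tasks.contains e.2 then
              (st.1.insert e.2 (st.1.getD e.2 [] ++ [e.1]),
               st.2.1.insert e.1 (st.2.1.getD e.1 [] ++ [e.2]),
               st.2.2.insert e.2 (st.2.2.getD e.2 0 + 1))
            else st)
          (tasks.foldl (fun d t => d.insert t ([] : List String)) PySem.Dict.empty,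
           tasks.foldl (fun d t => d.insert t ([] : List String)) PySem.Dict.empty,
           tasks.foldl (fun d t => d.insert t (0 : Int)) PySem.Dict.empty))
        = (edges.foldl (fun d e => if tasks.contains e.1 && tasks.contains e.2 then d.insert e.2 (d.getD e.2 [] ++ [e.1]) else d)
             (tasks.foldl (fun d t => d.insert t ([] : List String)) PySem.Dict.empty),
           edges.foldl (fun d e => if tasks.contains e.1 && tasks.contains e.2 then d.insert e.1 (d.getD e.1 [] ++ [e.2]) else d)
             (tasks.foldl (fun d t => d.insert t ([] : List String)) PySem.Dict.empty),
           edges.foldl (fun d e => if tasks.contains e.1 && tasks.contains e.2 then d.insert e.2 (d.getD e.2 0 + 1) else d)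
             (tasks.foldl (fun d t => d.insert t (0 : Int)) PySem.Dict.empty)) :=
      cmm_tripleFold (fun e => tasks.contains e.1 && tasks.contains e.2)
        (fun d e => d.insert e.2 (d.getD e.2 [] ++ [e.1]))
        (fun d e => d.insert e.1 (d.getD e.1 [] ++ [e.2]))
        (fun d e => d.insert e.2 (d.getD e.2 0 + 1))
        edges _ _ _
    rw [hst]
    set initL := tasks.foldl (fun d t => d.insert t ([] : List String)) PySem.Dict.empty with hinitL
    set initZ := tasks.foldl (fun d t => d.insert t (0 : Int)) PySem.Dict.empty with hinitZ
    set dd := PySem.Dict.mk durations with hdd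
    set parD := edges.foldl (fun d e => if tasks.contains e.1 && tasks.contains e.2 then d.insert e.2 (d.getD e.2 [] ++ [e.1]) else d) initL with hparDdef
    set outD := edges.foldl (fun d e => if tasks.contains e.1 && tasks.contains e.2 then d.insert e.1 (d.getD e.1 [] ++ [e.2]) else d) initL with houtDdef
    set indegD := edges.foldl (fun d e => if tasks.contains e.1 && tasks.contains e.2 then d.insert e.2 (d.getD e.2 0 + 1) else d) initZ with hindegDdef
    -- getD characterizations of the three dictionaries
    have hparA : ∀ t, parD.getD t [] = cmmPl tasks edges t := by
      intro t
      rw [hparDdef, hinitL]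
      have h := cmm_appendFold_getD (fun e => tasks.contains e.1 && tasks.contains e.2)
        (fun e => e.2) (fun e => e.1) edges (tasks.foldl (fun d t => d.insert t ([] : List String)) PySem.Dict.empty) t
      rw [cmm_getD_initFold] at h
      simp only [PySem.Dict.getD_empty, ite_self] at h
      simpa [cmmPl, cmmEdgesF] using h
    have houtA : ∀ t, outD.getD t [] = cmmOl tasks edges t := by
      intro t
      rw [houtDdef, hinitL]
      have h := cmm_appendFold_getD (fun e => tasks.contains e.1 && tasks.contains e.2)
        (fun e => e.1) (fun e => e.2) edges (tasks.foldl (fun d t => d.insert t ([] : List String)) PySem.Dict.empty) t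
      rw [cmm_getD_initFold] at h
      simp only [PySem.Dict.getD_empty, ite_self] at h
      simpa [cmmOl, cmmEdgesF] using h
    have hindA : ∀ t, indegD.getD t 0 = ((cmmPl tasks edges t).length : Int) := by
      intro t
      rw [hindegDdef, hinitZ]
      have h := cmm_indegFold_getD (fun e => tasks.contains e.1 && tasks.contains e.2) edges
        (tasks.foldl (fun d t => d.insert t (0 : Int)) PySem.Dict.empty) t
      rw [cmm_getD_initFold] at h
      simp only [PySem.Dict.getD_empty, ite_self, zero_add] at h
      rw [h]
      congr 1
      rw [cmmPl, List.length_map, List.count_eq_countP, List.countP_map]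
      rw [cmmEdgesF, ← List.countP_eq_length_filter]
      apply List.countP_congr
      intro e _
      simp [Function.comp]
    have hindA0 : ∀ t ∈ tasks, indegD.getD t 0
        = ((cmmPl tasks edges t).countP (fun p => !([] : List String).contains p) : Int) := by
      intro t _
      rw [hindA t]
      congr 1
      symm
      apply List.countP_eq_length.mpr
      intro p _
      simp
    set queue0 := PySem.List.sorted (tasks.filter (fun t => indegD.getD t 0 == 0)) (fun x => x) with hqueue0
    set rem0 := PySem.List.sorted tasks (fun x => x) with hrem0
    -- initial invariants
    have hqs0 : queue0.Pairwise (· < ·) := cmm_sorted_strict _ (hpre.filter _)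
    have hq0 : ∀ t, t ∈ queue0 ↔ t ∈ tasks ∧ t ∉ ([] : List String) ∧ ∀ p ∈ cmmPl tasks edges t, p ∈ ([] : List String) := by
      intro t
      rw [hqueue0, PySem.List.mem_sorted, List.mem_filter]
      constructor
      · rintro ⟨h1, h2⟩
        refine ⟨h1, by simp, ?_⟩
        rw [hindA t] at h2
        have h3 : (cmmPl tasks edges t).length = 0 := by
          have h4 := beq_iff_eq.mp h2
          exact_mod_cast h4
        intro p hp
        rw [List.length_eq_zero_iff.mp h3] at hp
        simp at hp
      · rintro ⟨h1, _, h3⟩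
        refine ⟨h1, ?_⟩
        rw [hindA t]
        have h4 : cmmPl tasks edges t = [] := by
          cases hplc : cmmPl tasks edges t with
          | nil => rfl
          | cons p ps =>
            have h5 := h3 p (by rw [hplc]; exact List.mem_cons_self ..)
            simp at h5
        rw [h4]
        simp
    have hrs0 : rem0.Pairwise (· < ·) := cmm_sorted_strict tasks hpre
    have hr0 : ∀ t, t ∈ rem0 ↔ t ∈ tasks ∧ t ∉ ([] : List String) := by
      intro t
      rw [hrem0, PySem.List.mem_sorted]
      simp
    have hsim := cmm_sim tasks edges hpre dd outD parD houtA hparA tasks.length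
      queue0 [] rem0 indegD PySem.Dict.empty
      (by simp) List.nodup_nil (by simp) (by simp) trivial
      hindA0 hqs0 hq0 hrs0 hr0 PySem.Dict.keys_empty (by simp)
    set topoF := cmmKahnLoop outD tasks.length queue0 [] indegD with htopoF
    by_cases hlen : topoF.length = tasks.length
    · rw [if_neg (by omega)]
      obtain ⟨finF, hsel, hkeysF, hndF, hmemF, hprecF, hvals⟩ := hsim.1 hlen
      simp only [hsel]
      refine congrArg some ?_
      have hest := cmm_est tasks edges dd parD hparA finF hvals topoF [] initZ
        (by simpa using hndF) (fun t ht => (hmemF t).mp ht) hprecF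
        (by intro t; rw [hinitZ, cmm_getD_initFold]; simp)
      have hkeysnodup : finF.keys.Nodup := by rw [hkeysF]; exact hndF
      have hvalsEq : finF.values = topoF.map (fun k => finF.getD k 0) := by
        rw [PySem.Dict.values_eq_map_keys finF hkeysnodup 0, hkeysF]
      have hptasks : tasks.Perm topoF :=
        (List.perm_ext_iff_of_nodup hpre hndF).mpr (fun a => (hmemF a).symm)
      calc pyMaxInt (tasks.map (fun t =>
              (topoF.foldl (fun d t => if (parD.getD t []).isEmpty then d
                else d.insert t (pyMaxInt ((parD.getD t []).map (fun p => d.getD p 0 + dd.getD p 0)))) initZ).getD t 0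
              + dd.getD t 0))
          = pyMaxInt (tasks.map (fun t => finF.getD t 0)) := by
            refine congrArg pyMaxInt (List.map_congr_left ?_)
            intro t ht
            rw [hest t]
            simp only [List.nil_append]
            rw [if_pos ((hmemF t).mpr ht)]
            ring
        _ = pyMaxInt (topoF.map (fun t => finF.getD t 0)) := pyMaxInt_perm _ _ (hptasks.map _)
        _ = pyMaxInt finF.values := by rw [hvalsEq]
    · rw [if_pos hlen]
      simp only [hsim.2 hlen]

-- ===== VERDICT (by name: the statement is the Claim_ definition above) =====
theorem compute_minimal_makespan_spec : Claim_equal_compute_minimal_makespan := by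
  intro tasks edges durations _hdom hpre
  exact cmm_main tasks edges durations hpre
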